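-- pv_equiv track=rewrite | github.com/JosephHHendrickson/Sonar_Treasure_Hunt-1 | Sonar_Treasure_Hunt.py | strip_input
-- ===== SOURCE A (Python) =====
-- def strip_input(x):
--
--     # make sure we have at least one digit
--     y="0"
--
--     if len(x) > 0:
--
--         #remove leading blanks
--         for i in range(len(x)):
--             if x[i] != " ":
--                 break
--         x = x[i:len(x)]
--
--         #make sure a legal minus sign gets copied
--         if x[0] == "-":
--             y ="-"
--
--         #Only accept digits and one decimal point
--         num_of_decimal_points = 0
--         for i in range(len(x)):
--             if x[i] in "1234567890":
--                 y = y+x[i]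
--             elif x[i] == "." and num_of_decimal_points == 0:
--                 y = y+x[i]
--                 num_of_decimal_points = 1
--
--     return y
-- ===== SOURCE B (Python) =====
-- def strip_input(x):
--     if not x:
--         return "0"
--     s = x.lstrip(' ')
--     sign = "-" if s.startswith('-') else "0"
--     head, dot, tail = s.partition('.')
--     res = sign + ''.join(c for c in head if c in "1234567890")
--     if dot:
--         res += '.' + ''.join(c for c in tail if c in "1234567890")
--     return res
-- ===== Notes on version B (the rewrite author's own statement) =====
-- stated objective: simpler
-- what changed: Replaces the stateful single pass (index loop for leading blanks plus a decimal-point counter threaded through the scan) with a structural decomposition: lstrip(' '), a sign test, partition on the first '.', and two stateless digit filters joined at the end.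
import Mathlib
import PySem

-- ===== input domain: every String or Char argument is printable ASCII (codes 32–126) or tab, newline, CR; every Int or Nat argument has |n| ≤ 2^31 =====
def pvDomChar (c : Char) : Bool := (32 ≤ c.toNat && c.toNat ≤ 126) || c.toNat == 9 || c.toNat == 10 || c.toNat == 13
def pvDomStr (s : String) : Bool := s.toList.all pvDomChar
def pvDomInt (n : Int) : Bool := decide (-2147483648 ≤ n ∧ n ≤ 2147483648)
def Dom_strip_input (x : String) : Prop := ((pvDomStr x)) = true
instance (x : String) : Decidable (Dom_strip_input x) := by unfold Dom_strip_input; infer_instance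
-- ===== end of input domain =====

-- B replaces A's stateful scan (leading-blank index loop + decimal counter) by a structural
-- decomposition (lstrip, sign test, partition at the first '.', two digit filters): simpler.

-- the test  c in "1234567890"  (both sources contain this literal membership test)
def pvIsDig (c : Char) : Bool := ("1234567890".toList).contains c

-- ===== PORT A =====
-- 'for i in range(len(x)): if x[i] != " ": break' followed by 'x = x[i:len(x)]':
-- structural recursion returning the suffix from the break index (when the loop exhausts,
-- i is len(x)-1, so the last character is kept even if it is a blank).
def pvStripLeadA : List Char → List Char
  | [] => []
  | [c] => [c]
  | c :: d :: rest => if c ≠ ' ' then c :: d :: rest else pvStripLeadA (d :: rest)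

-- body of the second loop: state (y, num_of_decimal_points)
def pvStepA (st : List Char × Nat) (c : Char) : List Char × Nat :=
  if pvIsDig c then (st.1 ++ [c], st.2)
  else if c = '.' ∧ st.2 = 0 then (st.1 ++ [c], 1)
  else st

def strip_input (x : String) : String :=
  let cs := x.toList
  if cs.length > 0 then
    let cs2 := pvStripLeadA cs
    let y0 : List Char := if cs2.head? = some '-' then ['-'] else ['0']
    let r := cs2.foldl pvStepA (y0, 0)
    String.mk r.1
  else "0"

-- ===== PORT B =====
def pvDigitsB (l : List Char) : List Char := l.filter pvIsDig

def strip_input_alt (x : String) : String :=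
  if x.toList.isEmpty then "0"
  else
    let s := x.toList.dropWhile (fun c => c == ' ')        -- x.lstrip(' '): drop leading spaces only (exact)
    let sign : List Char := if PySem.Chars.startswith s ['-'] then ['-'] else ['0']
    let head := s.takeWhile (fun c => c != '.')            -- s.partition('.'): part before the first '.'
    let rest := s.dropWhile (fun c => c != '.')            -- '.' and the part after it (empty if no '.')
    String.mk (sign ++ pvDigitsB head ++
      (match rest with
       | [] => []
       | _ :: tail => '.' :: pvDigitsB tail))

-- ===== PRECONDITION & SPEC =====
def Spec_strip_input (x : String) (out : String) : Prop := out = strip_input_alt x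
instance (x : String) (out : String) : Decidable (Spec_strip_input x out) := by unfold Spec_strip_input; infer_instance

-- ===== CLAIM (what is proved, stated in full; the proofs are below) =====
def Claim_equal_strip_input : Prop := ∀ (x : String), Dom_strip_input x → Spec_strip_input x (strip_input x)

-- ===== LEMMAS AND PROOFS =====

-- the leading-blank loop agrees with dropWhile when some non-blank exists
theorem pvStripLeadA_eq (cs : List Char) (h : cs.dropWhile (fun c => c == ' ') ≠ []) :
    pvStripLeadA cs = cs.dropWhile (fun c => c == ' ') := by
  induction cs with
  | nil => simp [pvStripLeadA]
  | cons c rest ih =>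
    by_cases hc : c = ' '
    · subst hc
      have hb : ((' ' : Char) == ' ') = true := rfl
      cases rest with
      | nil => simp only [List.dropWhile, hb] at h; exact absurd rfl h
      | cons d rest' =>
        have h' : (d :: rest').dropWhile (fun c => c == ' ') ≠ [] := by
          simpa only [List.dropWhile, hb] using h
        calc pvStripLeadA (' ' :: d :: rest') = pvStripLeadA (d :: rest') := by
              simp [pvStripLeadA]
          _ = (d :: rest').dropWhile (fun c => c == ' ') := ih h'
          _ = (' ' :: d :: rest').dropWhile (fun c => c == ' ') := by
              simp only [List.dropWhile, hb]
    · have hb : (c == ' ') = false := by simp [hc]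
      cases rest with
      | nil => simp [pvStripLeadA, List.dropWhile, hb]
      | cons d rest' => simp [pvStripLeadA, hc, List.dropWhile, hb]

-- when everything is blank (and the string nonempty), the loop keeps the last blank
theorem pvStripLeadA_all_space (cs : List Char) (h0 : cs ≠ [])
    (h : cs.dropWhile (fun c => c == ' ') = []) : pvStripLeadA cs = [' '] := by
  induction cs with
  | nil => exact absurd rfl h0
  | cons c rest ih =>
    by_cases hc : c = ' '
    · subst hc
      have hb : ((' ' : Char) == ' ') = true := rfl
      cases rest with
      | nil => simp [pvStripLeadA]
      | cons d rest' =>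
        have h' : (d :: rest').dropWhile (fun c => c == ' ') = [] := by
          simpa only [List.dropWhile, hb] using h
        calc pvStripLeadA (' ' :: d :: rest') = pvStripLeadA (d :: rest') := by
              simp [pvStripLeadA]
          _ = [' '] := ih (by simp) h'
    · have hb : (c == ' ') = false := by simp [hc]
      simp only [List.dropWhile, hb] at h
      exact absurd h (by simp)

-- second loop, state already saw a decimal point: plain digit filter
theorem pvFold_one (cs : List Char) (y : List Char) :
    cs.foldl pvStepA (y, 1) = (y ++ pvDigitsB cs, 1) := by
  induction cs generalizing y with
  | nil => simp [pvDigitsB]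
  | cons c rest ih =>
    simp only [List.foldl, pvStepA]
    cases hd : pvIsDig c with
    | true => simp [hd, ih, pvDigitsB, List.filter_cons]
    | false => simp [hd, ih, pvDigitsB, List.filter_cons]

-- second loop, no decimal point seen yet: B's partition-based decomposition
theorem pvFold_zero (cs : List Char) (y : List Char) :
    (cs.foldl pvStepA (y, 0)).1 =
      y ++ pvDigitsB (cs.takeWhile (fun c => c != '.')) ++
        (match cs.dropWhile (fun c => c != '.') with
         | [] => []
         | _ :: tail => '.' :: pvDigitsB tail) := by
  induction cs generalizing y with
  | nil => simp [pvDigitsB]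
  | cons c rest ih =>
    simp only [List.foldl, pvStepA]
    by_cases hdot : c = '.'
    · subst hdot
      have hnd : pvIsDig '.' = false := by decide
      simp [hnd, pvFold_one, List.takeWhile, List.dropWhile, pvDigitsB]
    · have hne : (c != '.') = true := by simp [hdot]
      cases hd : pvIsDig c with
      | true =>
        simp [hd, hne, List.takeWhile, List.dropWhile, pvDigitsB, List.filter_cons, ih]
      | false =>
        simp [hd, hne, hdot, List.takeWhile, List.dropWhile, pvDigitsB, List.filter_cons, ih]

-- startswith('-') versus head
theorem pvStartswith_neg (s : List Char) :
    PySem.Chars.startswith s ['-'] = true ↔ s.head? = some '-' := by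
  rw [PySem.Chars.startswith_iff]
  cases s with
  | nil => simp
  | cons c rest => simp [List.cons_prefix_iff]

-- ===== VERDICT (by name: the statement is the Claim_ definition above) =====
theorem strip_input_spec : Claim_equal_strip_input := by
  intro x _
  unfold Spec_strip_input strip_input strip_input_alt
  rcases hcs : x.toList with _ | ⟨c, rest⟩
  · simp [hcs]
  · have hne : x.toList ≠ [] := by rw [hcs]; simp
    rw [← hcs]
    simp only [List.length_pos_iff.mpr hne, List.isEmpty_iff, if_neg hne]
    by_cases hall : x.toList.dropWhile (fun c => c == ' ') = []
    · rw [pvStripLeadA_all_space _ hne hall, hall]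
      have h1 : PySem.Chars.startswith ([] : List Char) ['-'] = false := by decide
      have h2 : pvIsDig ' ' = false := by decide
      simp [pvStepA, pvDigitsB, h1, h2, List.takeWhile, List.dropWhile]
    · rw [pvStripLeadA_eq _ hall]
      set s := x.toList.dropWhile (fun c => c == ' ') with hs
      have hsign : (if s.head? = some '-' then ['-'] else ['0']) =
          (if PySem.Chars.startswith s ['-'] then ['-'] else ['0']) := by
        by_cases hh : s.head? = some '-'
        · rw [if_pos hh, if_pos ((pvStartswith_neg s).mpr hh)]
        · rw [if_neg hh]
          rcases hb : PySem.Chars.startswith s ['-'] with _ | _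
          · rfl
          · exact absurd ((pvStartswith_neg s).mp hb) hh
      rw [hsign, pvFold_zero]
      simp
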